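-- pv_equiv track=rewrite | github.com/agustinmacri/factsheets | src/lector_maestro.py | _buscar_columna_clase
-- ===== SOURCE A (Python) =====
-- def _buscar_columna_clase(columnas, fdo_key: str, clase_preferida: str) -> str | None:
--     """
--     Busca la columna VCP para un fondo y clase.
--     Orden de preferencia: clase solicitada → A → B → C
--     """
--     clase_preferida = clase_preferida.lower()
--     orden = [clase_preferida] + [c for c in ["a", "b", "c"] if c != clase_preferida]
--
--     for clase in orden:
--         # Patrones posibles: fondo_uno_a, fondo_uno_clase_a, fondo_uno-a
--         candidatos = [
--             f"{fdo_key}_{clase}",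
--             f"{fdo_key}_clase_{clase}",
--         ]
--         for col in columnas:
--             col_norm = col.strip().lower()
--             if any(col_norm == c or col_norm.endswith(f"_{clase}") and
--                    col_norm.startswith(fdo_key) for c in candidatos):
--                 return col
--
--     return None
-- ===== SOURCE B (Python) =====
-- def _buscar_columna_clase(columnas, fdo_key: str, clase_preferida: str) -> str | None:
--     """One indexing pass: record, per class letter, the first column whose
--     normalized form starts with fdo_key and ends with '_<class>'; then look
--     the classes up in preference order."""
--     clase_preferida = clase_preferida.lower()
--     orden = [clase_preferida] + [c for c in ["a", "b", "c"] if c != clase_preferida]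
--     primera = {}
--     for col in columnas:
--         col_norm = col.strip().lower()
--         if col_norm.startswith(fdo_key):
--             for clase in orden:
--                 if clase not in primera and col_norm.endswith("_" + clase):
--                     primera[clase] = col
--     for clase in orden:
--         if clase in primera:
--             return primera[clase]
--     return None
-- ===== Notes on version B (the rewrite author's own statement) =====
-- stated objective: faster
-- what changed: A rescans columnas once per class in preference order, rebuilding the candidato strings per column; B makes a single indexing pass over columnas that records the first matching column per class in a dict (the equality candidates are absorbed by the startswith/endswith test), then looks the classes up in preference order.
import Mathlib
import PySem

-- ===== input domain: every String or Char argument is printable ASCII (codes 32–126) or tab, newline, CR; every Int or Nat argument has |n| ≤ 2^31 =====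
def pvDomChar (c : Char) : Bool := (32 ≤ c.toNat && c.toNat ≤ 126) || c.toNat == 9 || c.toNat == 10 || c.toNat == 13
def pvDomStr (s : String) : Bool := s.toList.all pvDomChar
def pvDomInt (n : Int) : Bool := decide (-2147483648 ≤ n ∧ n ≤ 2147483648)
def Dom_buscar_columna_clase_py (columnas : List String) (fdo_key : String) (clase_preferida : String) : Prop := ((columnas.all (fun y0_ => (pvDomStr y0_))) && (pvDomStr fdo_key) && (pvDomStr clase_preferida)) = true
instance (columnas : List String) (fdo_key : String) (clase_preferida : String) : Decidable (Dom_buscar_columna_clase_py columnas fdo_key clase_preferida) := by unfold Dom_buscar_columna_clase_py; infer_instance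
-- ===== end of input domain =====

-- B replaces A's per-class rescans of columnas by one indexing pass recording the first
-- matching column per class, then a lookup in preference order (objective: alternative).

-- ===== PORT A =====
-- A's `any` over candidatos, on one column for a given class
def pvCondA (fdo_key clase col : String) : Bool :=
  let col_norm := PySem.Str.lower (PySem.Str.strip col)
  [fdo_key ++ "_" ++ clase, fdo_key ++ "_clase_" ++ clase].any
    (fun c => col_norm == c ||
      (PySem.Str.endswith col_norm ("_" ++ clase) && PySem.Str.startswith col_norm fdo_key))

-- A's outer loop over orden; the inner `for col in columnas: … return col` is find?
def pvALoop (columnas : List String) (fdo_key : String) : List String → Option String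
  | [] => none
  | clase :: rest =>
    match columnas.find? (fun col => pvCondA fdo_key clase col) with
    | some col => some col
    | none => pvALoop columnas fdo_key rest

def buscar_columna_clase_py (columnas : List String) (fdo_key : String) (clase_preferida : String) : Option String :=
  let cp := PySem.Str.lower clase_preferida
  let orden := cp :: (["a", "b", "c"].filter (fun c => c != cp))
  pvALoop columnas fdo_key orden

-- ===== PORT B =====
-- B's inner loop over orden recording a not-yet-seen class whose suffix matches
def pvRecord (col col_norm : String) (orden : List String) (d : PySem.Dict String String) : PySem.Dict String String :=
  orden.foldl (fun d clase =>
    if !d.contains clase && PySem.Str.endswith col_norm ("_" ++ clase)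
    then d.insert clase col else d) d

-- B's single pass over columnas building the index `primera`
def pvScan (columnas : List String) (fdo_key : String) (orden : List String) : PySem.Dict String String :=
  columnas.foldl (fun d col =>
    let col_norm := PySem.Str.lower (PySem.Str.strip col)
    if PySem.Str.startswith col_norm fdo_key then pvRecord col col_norm orden d else d)
    PySem.Dict.empty

-- B's final lookup in preference order
def pvBLookup (d : PySem.Dict String String) : List String → Option String
  | [] => none
  | clase :: rest => if d.contains clase then d.get? clase else pvBLookup d rest

def buscar_columna_clase_py_alt (columnas : List String) (fdo_key : String) (clase_preferida : String) : Option String :=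
  let cp := PySem.Str.lower clase_preferida
  let orden := cp :: (["a", "b", "c"].filter (fun c => c != cp))
  pvBLookup (pvScan columnas fdo_key orden) orden

-- ===== PRECONDITION & SPEC =====
def Spec_buscar_columna_clase_py (columnas : List String) (fdo_key : String) (clase_preferida : String) (out : Option String) : Prop := out = buscar_columna_clase_py_alt columnas fdo_key clase_preferida
instance (columnas : List String) (fdo_key : String) (clase_preferida : String) (out : Option String) : Decidable (Spec_buscar_columna_clase_py columnas fdo_key clase_preferida out) := by unfold Spec_buscar_columna_clase_py; infer_instance

-- ===== CLAIM (what is proved, stated in full; the proofs are below) =====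
def Claim_equal_buscar_columna_clase_py : Prop := ∀ (columnas : List String) (fdo_key : String) (clase_preferida : String), Dom_buscar_columna_clase_py columnas fdo_key clase_preferida → Spec_buscar_columna_clase_py columnas fdo_key clase_preferida (buscar_columna_clase_py columnas fdo_key clase_preferida)

-- ===== LEMMAS AND PROOFS =====

-- the common per-class match predicate both programs effectively test
def pvP (fdo_key clase col : String) : Bool :=
  let col_norm := PySem.Str.lower (PySem.Str.strip col)
  PySem.Str.startswith col_norm fdo_key && PySem.Str.endswith col_norm ("_" ++ clase)

-- A's `any` condition collapses to startswith ∧ endswith: each candidato itself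
-- starts with fdo_key and ends with "_" ++ clase, so the equality disjuncts are absorbed
theorem pvCondA_eq_pvP (fdo_key clase col : String) :
    pvCondA fdo_key clase col = pvP fdo_key clase col := by
  unfold pvCondA pvP
  simp only [List.any_cons, List.any_nil, Bool.or_false]
  by_cases h1 : PySem.Str.lower (PySem.Str.strip col) = fdo_key ++ "_" ++ clase
  · rw [h1]
    simp only [beq_self_eq_true, Bool.true_or, Bool.true_eq, Bool.and_eq_true,
      PySem.Str.startswith_eq, PySem.Str.endswith_eq, String.toList_append,
      PySem.Chars.startswith_iff, PySem.Chars.endswith_iff]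
    exact ⟨⟨'_' :: clase.toList, by simp⟩, ⟨fdo_key.toList, by simp⟩⟩
  · by_cases h2 : PySem.Str.lower (PySem.Str.strip col) = fdo_key ++ "_clase_" ++ clase
    · rw [h2]
      simp only [beq_self_eq_true, Bool.true_or, Bool.or_true, Bool.true_eq, Bool.and_eq_true,
        PySem.Str.startswith_eq, PySem.Str.endswith_eq, String.toList_append,
        PySem.Chars.startswith_iff, PySem.Chars.endswith_iff]
      refine ⟨⟨'_' :: 'c' :: 'l' :: 'a' :: 's' :: 'e' :: '_' :: clase.toList, by simp⟩,
        ⟨fdo_key.toList ++ ['_', 'c', 'l', 'a', 's', 'e'], by simp⟩⟩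
    · rw [beq_false_of_ne h1, beq_false_of_ne h2]
      simp [Bool.and_comm]

-- effect of one pvRecord step on a lookup
theorem pvRecord_get? (col col_norm : String) (orden : List String)
    (d : PySem.Dict String String) (j : String) :
    (pvRecord col col_norm orden d).get? j =
      if j ∈ orden ∧ d.contains j = false ∧ PySem.Str.endswith col_norm ("_" ++ j) = true
      then some col else d.get? j := by
  induction orden generalizing d with
  | nil => simp [pvRecord]
  | cons clase rest ih =>
    unfold pvRecord at *
    rw [List.foldl_cons]
    by_cases hcond : (!d.contains clase && PySem.Str.endswith col_norm ("_" ++ clase)) = true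
    · obtain ⟨hnc, he⟩ := Bool.and_eq_true_iff.mp hcond
      rw [Bool.not_eq_eq_eq_not, Bool.not_true] at hnc
      rw [if_pos hcond, ih]
      by_cases hj : j = clase
      · subst hj
        rw [if_neg, PySem.Dict.get?_insert_self, if_pos ⟨List.mem_cons_self, hnc, he⟩]
        rintro ⟨-, hcf, -⟩
        rw [PySem.Dict.contains_insert_self] at hcf
        exact absurd hcf (by simp)
      · rw [PySem.Dict.get?_insert_of_ne _ _ hj]
        have hci : (d.insert clase col).contains j = d.contains j := by
          rw [PySem.Dict.contains_insert, beq_false_of_ne hj, Bool.false_or]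
        rw [hci]
        simp [hj]
    · rw [if_neg hcond, ih]
      rw [Bool.and_eq_true_iff, not_and, Bool.not_eq_eq_eq_not, Bool.not_true] at hcond
      by_cases hj : j = clase
      · subst hj
        rw [if_neg, if_neg]
        · rintro ⟨-, hc, he⟩; exact absurd he (by simpa using hcond hc)
        · rintro ⟨-, hc, he⟩; exact absurd he (by simpa using hcond hc)
      · simp [hj]

-- the scan, started from any dict: get? j is the old value, else the first match
theorem pvScan_get?_aux (fdo_key : String) (orden : List String) (j : String)
    (hj : j ∈ orden) (columnas : List String) (d : PySem.Dict String String) :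
    (columnas.foldl (fun d col =>
      let col_norm := PySem.Str.lower (PySem.Str.strip col)
      if PySem.Str.startswith col_norm fdo_key then pvRecord col col_norm orden d else d) d).get? j
    = ((d.get? j).or (columnas.find? (fun col => pvP fdo_key j col))) := by
  induction columnas generalizing d with
  | nil => simp
  | cons col rest ih =>
    rw [List.foldl_cons, ih, List.find?_cons]
    by_cases hs : PySem.Str.startswith (PySem.Str.lower (PySem.Str.strip col)) fdo_key = true
    · simp only [hs, if_pos, pvRecord_get?]
      cases hd : d.get? j with
      | some v =>
        have hc : d.contains j = true := by
          rw [PySem.Dict.contains_eq_isSome_get?, hd]; rfl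
        rw [if_neg (by rintro ⟨-, hcf, -⟩; rw [hc] at hcf; exact absurd hcf (by simp))]
        cases hp : pvP fdo_key j col <;> rfl
      | none =>
        have hc : d.contains j = false := by
          rw [PySem.Dict.contains_eq_isSome_get?, hd]; rfl
        by_cases he : PySem.Str.endswith (PySem.Str.lower (PySem.Str.strip col)) ("_" ++ j) = true
        · rw [if_pos ⟨hj, hc, he⟩]
          have hp : pvP fdo_key j col = true := by
            unfold pvP; rw [Bool.and_eq_true_iff]; exact ⟨hs, he⟩
          rw [hp]
          rfl
        · rw [if_neg (by rintro ⟨-, -, hef⟩; exact he hef)]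
          have hp : pvP fdo_key j col = false := by
            unfold pvP
            simp only [Bool.and_eq_false_iff]
            right; simpa using he
          rw [hp]
    · rw [if_neg hs]
      have hp : pvP fdo_key j col = false := by
        unfold pvP
        simp only [Bool.and_eq_false_iff]
        left; simpa using hs
      rw [hp]

-- B's index: for a class in orden, get? is the first matching column
theorem pvScan_get? (columnas : List String) (fdo_key : String) (orden : List String)
    (j : String) (hj : j ∈ orden) :
    (pvScan columnas fdo_key orden).get? j = columnas.find? (fun col => pvP fdo_key j col) := by
  unfold pvScan
  rw [pvScan_get?_aux fdo_key orden j hj columnas PySem.Dict.empty, PySem.Dict.get?_empty]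
  rfl

-- A's loop over orden equals B's lookup over the same suffix of orden
theorem pvLoops_eq (columnas : List String) (fdo_key : String) (orden rest : List String)
    (hsub : ∀ j ∈ rest, j ∈ orden) :
    pvALoop columnas fdo_key rest = pvBLookup (pvScan columnas fdo_key orden) rest := by
  induction rest with
  | nil => rfl
  | cons clase r ih =>
    unfold pvALoop pvBLookup
    have hg : (pvScan columnas fdo_key orden).get? clase
        = columnas.find? (fun col => pvP fdo_key clase col) :=
      pvScan_get? columnas fdo_key orden clase (hsub clase List.mem_cons_self)
    have hca : (fun col => pvCondA fdo_key clase col) = (fun col => pvP fdo_key clase col) :=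
      funext (fun col => pvCondA_eq_pvP fdo_key clase col)
    rw [hca]
    cases hf : columnas.find? (fun col => pvP fdo_key clase col) with
    | some col =>
      have hc : (pvScan columnas fdo_key orden).contains clase = true := by
        rw [PySem.Dict.contains_eq_isSome_get?, hg, hf]; rfl
      rw [if_pos hc, hg, hf]
    | none =>
      have hc : (pvScan columnas fdo_key orden).contains clase = false := by
        rw [PySem.Dict.contains_eq_isSome_get?, hg, hf]; rfl
      rw [if_neg (by simp [hc])]
      exact ih (fun j hj => hsub j (List.mem_cons_of_mem _ hj))

-- ===== VERDICT (by name: the statement is the Claim_ definition above) =====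
theorem buscar_columna_clase_py_spec : Claim_equal_buscar_columna_clase_py := by
  intro columnas fdo_key clase_preferida _
  unfold Spec_buscar_columna_clase_py buscar_columna_clase_py buscar_columna_clase_py_alt
  exact pvLoops_eq columnas fdo_key _ _ (fun j h => h)
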